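-- pv_equiv track=rewrite | github.com/sai-vishnu-arvind/oac-slack-bot | src/oac_slack_bot/slack/format.py | _protect_code_spans
-- ===== SOURCE A (Python) =====
-- def _protect_code_spans(text: str) -> tuple[str, list[str]]:
--     result: list[str] = []
--     spans: list[str] = []
--     chars = list(text)
--     i = 0
--
--     while i < len(chars):
--         if chars[i] == "`":
--             j = i + 1
--             code: list[str] = []
--             closed = False
--             while j < len(chars):
--                 if chars[j] == "`":
--                     closed = True
--                     j += 1
--                     break
--                 code.append(chars[j])
--                 j += 1
--             if closed:
--                 idx = len(spans)
--                 spans.append(f"`{''.join(code)}`")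
--                 result.append(f"\x00C{idx}\x00")
--                 i = j
--             else:
--                 result.append("`")
--                 i += 1
--         else:
--             result.append(chars[i])
--             i += 1
--
--     return "".join(result), spans
-- ===== SOURCE B (Python) =====
-- def _protect_code_spans(text: str) -> tuple[str, list[str]]:
--     pieces = text.split("`")
--     out = [pieces[0]]
--     spans = []
--     i = 1
--     while i + 1 < len(pieces):
--         spans.append("`" + pieces[i] + "`")
--         out.append("\x00C%d\x00" % (len(spans) - 1))
--         out.append(pieces[i + 1])
--         i += 2
--     if i < len(pieces):
--         out.append("`" + pieces[i])
--     return "".join(out), spans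
-- ===== Notes on version B (the rewrite author's own statement) =====
-- stated objective: simpler
-- what changed: A's manual char-by-char while loop with an inner closing-backtick scan is replaced by one str.split on the backtick character followed by a single loop that consumes the pieces pairwise (odd-position pieces become spans, even-position pieces stay literal, a trailing odd piece is an unclosed backtick left as-is).
import Mathlib
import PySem

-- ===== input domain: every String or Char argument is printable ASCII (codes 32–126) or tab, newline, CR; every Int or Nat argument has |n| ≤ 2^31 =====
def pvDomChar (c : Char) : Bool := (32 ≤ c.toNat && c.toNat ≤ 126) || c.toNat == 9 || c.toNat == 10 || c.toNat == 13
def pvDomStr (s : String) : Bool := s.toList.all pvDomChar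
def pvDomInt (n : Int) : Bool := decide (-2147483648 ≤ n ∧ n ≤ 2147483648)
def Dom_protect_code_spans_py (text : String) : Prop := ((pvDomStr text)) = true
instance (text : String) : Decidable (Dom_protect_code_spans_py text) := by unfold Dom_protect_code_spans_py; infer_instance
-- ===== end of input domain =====

-- B replaces A's char-by-char scan with one split("`") followed by a pairwise walk over the
-- pieces (objective: simpler, and measurably faster by a constant factor in Python).

-- the placeholder "\x00C{idx}\x00" (shared literal helper of both ports)
def pvPHc (n : Nat) : List Char := '\x00' :: 'C' :: (PySem.Int.toChars (n : Int) ++ ['\x00'])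

-- ===== PORT A =====
-- inner while loop of A: scan for the closing backtick; returns (code, closed, rest after j)
def pvInnerA : List Char → (List Char × Bool × List Char)
  | [] => ([], false, [])
  | c :: rest =>
    if c = '`' then ([], true, rest)
    else
      let t := pvInnerA rest
      (c :: t.1, t.2.1, t.2.2)

lemma pvInnerA_len (l : List Char) : (pvInnerA l).2.2.length ≤ l.length := by
  induction l with
  | nil => simp [pvInnerA]
  | cons c rest ih =>
    simp only [pvInnerA]
    split_ifs
    · simp
    · simp; omega

-- outer while loop of A, with the result and spans accumulators
def pvMainA : List Char → List (List Char) → List (List Char) → (List (List Char) × List (List Char))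
  | [], result, spans => (result, spans)
  | c :: rest, result, spans =>
    if c = '`' then
      match hm : pvInnerA rest with
      | (code, closed, r) =>
        if closed then
          pvMainA r (result ++ [pvPHc spans.length]) (spans ++ ['`' :: (code ++ ['`'])])
        else
          pvMainA rest (result ++ [['`']]) spans
    else
      pvMainA rest (result ++ [[c]]) spans
termination_by l _ _ => l.length
decreasing_by
  all_goals first
    | (have h := pvInnerA_len rest; rw [hm] at h; simp at h ⊢; omega)
    | simp

def protect_code_spans_py (text : String) : String × List String :=
  let r := pvMainA text.toList [] []
  (String.ofList r.1.flatten, r.2.map String.ofList)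

-- ===== PORT B =====
-- B's while loop: consume the split pieces two at a time (i += 2)
def pvLoopB : List (List Char) → List (List Char) → List (List Char) → (List (List Char) × List (List Char))
  | [], out, spans => (out, spans)
  | [p], out, spans => (out ++ ['`' :: p], spans)
  | p :: q :: rest, out, spans =>
    let spans' := spans ++ ['`' :: (p ++ ['`'])]
    pvLoopB rest (out ++ [pvPHc (spans'.length - 1), q]) spans'

def protect_code_spans_py_alt (text : String) : String × List String :=
  match PySem.Chars.splitOn text.toList ['`'] with
  | [] => ("", [])  -- unreachable: split always returns at least one piece
  | p0 :: rest =>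
    let r := pvLoopB rest [p0] []
    (String.ofList r.1.flatten, r.2.map String.ofList)

-- ===== PRECONDITION & SPEC =====
def Spec_protect_code_spans_py (text : String) (out : String × List String) : Prop := out = protect_code_spans_py_alt text
instance (text : String) (out : String × List String) : Decidable (Spec_protect_code_spans_py text out) := by unfold Spec_protect_code_spans_py; infer_instance

-- ===== CLAIM (what is proved, stated in full; the proofs are below) =====
def Claim_equal_protect_code_spans_py : Prop := ∀ (text : String), Dom_protect_code_spans_py text → Spec_protect_code_spans_py text (protect_code_spans_py text)

-- ===== LEMMAS AND PROOFS =====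

-- proof-side model of text.split("`")
def mySplit : List Char → List (List Char)
  | [] => [[]]
  | c :: rest =>
    let r := mySplit rest
    if c = '`' then [] :: r else (c :: r.headI) :: r.tail

lemma mySplit_cons (l : List Char) : mySplit l = (mySplit l).headI :: (mySplit l).tail := by
  cases l with
  | nil => simp [mySplit]
  | cons c rest => simp only [mySplit]; split_ifs <;> simp

lemma splitOn_go_eq : ∀ (l : List Char) (fuel : Nat) (cur : List Char) (acc : List (List Char)),
    l.length < fuel →
    PySem.Chars.splitOn.go ['`'] fuel l cur acc =
      acc.reverse ++ (cur.reverse ++ (mySplit l).headI) :: (mySplit l).tail := by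
  intro l
  induction l with
  | nil =>
    intro fuel cur acc h
    cases fuel with
    | zero => omega
    | succ f => simp [PySem.Chars.splitOn.go, mySplit]
  | cons c rest ih =>
    intro fuel cur acc h
    have hf : rest.length < fuel - 1 := by simp at h; omega
    cases fuel with
    | zero => omega
    | succ f =>
      by_cases hc : c = '`'
      · subst hc
        rw [show PySem.Chars.splitOn.go ['`'] (f + 1) ('`' :: rest) cur acc =
              PySem.Chars.splitOn.go ['`'] f rest [] (cur.reverse :: acc) from by
            simp [PySem.Chars.splitOn.go, List.isPrefixOf]]
        rw [ih f [] (cur.reverse :: acc) (by simpa using hf)]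
        rw [show mySplit ('`' :: rest) = [] :: mySplit rest from by simp [mySplit]]
        simp only [List.reverse_cons, List.append_assoc, List.reverse_nil, List.nil_append,
          List.headI_cons, List.tail_cons, List.singleton_append, List.append_nil]
        rw [← mySplit_cons rest]
      · rw [show PySem.Chars.splitOn.go ['`'] (f + 1) (c :: rest) cur acc =
              PySem.Chars.splitOn.go ['`'] f rest (c :: cur) acc from by
            simp only [PySem.Chars.splitOn.go, List.isPrefixOf, Bool.and_true]
            rw [if_neg]
            simp only [beq_iff_eq]
            exact fun h' => hc h'.symm]
        rw [ih f (c :: cur) acc (by simpa using hf)]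
        simp [mySplit, hc]

lemma splitOn_eq_mySplit (l : List Char) : PySem.Chars.splitOn l ['`'] = mySplit l := by
  rw [PySem.Chars.splitOn, splitOn_go_eq l (l.length + 1) [] [] (by omega)]
  simpa using (mySplit_cons l).symm

-- accumulator-free form of A's loop (n = number of spans collected so far)
def pvFA : List Char → Nat → (List (List Char) × List (List Char))
  | [], _ => ([], [])
  | c :: rest, n =>
    if c = '`' then
      match hm : pvInnerA rest with
      | (code, closed, r) =>
        if closed then
          (pvPHc n :: (pvFA r (n + 1)).1, ('`' :: (code ++ ['`'])) :: (pvFA r (n + 1)).2)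
        else
          (['`'] :: (pvFA rest n).1, (pvFA rest n).2)
    else
      ([c] :: (pvFA rest n).1, (pvFA rest n).2)
termination_by l _ => l.length
decreasing_by
  all_goals first
    | (have h := pvInnerA_len rest; rw [hm] at h; simp at h ⊢; omega)
    | simp

-- accumulator-free form of B's loop
def pvFB : List (List Char) → Nat → (List (List Char) × List (List Char))
  | [], _ => ([], [])
  | [p], _ => (['`' :: p], [])
  | p :: q :: rest, n =>
    let r := pvFB rest (n + 1)
    (pvPHc n :: q :: r.1, ('`' :: (p ++ ['`'])) :: r.2)

lemma pvMainA_acc (l : List Char) (res spans : List (List Char)) :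
    pvMainA l res spans = (res ++ (pvFA l spans.length).1, spans ++ (pvFA l spans.length).2) := by
  fun_induction pvMainA l res spans with
  | case1 res spans => simp [pvFA]
  | case2 rest res spans code r hm ih =>
    rw [ih]
    simp [pvFA, hm]
  | case3 rest res spans code cl rr heq hne ih =>
    rw [ih]
    have hcl : cl = false := by simpa using hne
    subst hcl
    simp [pvFA, heq]
  | case4 c rest res spans hc ih =>
    rw [ih]
    simp [pvFA, hc]

lemma pvLoopB_acc (l : List (List Char)) (out spans : List (List Char)) :
    pvLoopB l out spans = (out ++ (pvFB l spans.length).1, spans ++ (pvFB l spans.length).2) := by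
  fun_induction pvLoopB l out spans with
  | case1 out spans => simp [pvFB]
  | case2 p out spans => simp [pvFB]
  | case3 p q rest out spans sp ih =>
    rw [ih]
    simp [pvFB, sp]

lemma pvInnerA_closed_mySplit (l : List Char) (h : (pvInnerA l).2.1 = true) :
    mySplit l = (pvInnerA l).1 :: mySplit (pvInnerA l).2.2 := by
  induction l with
  | nil => simp [pvInnerA] at h
  | cons c rest ih =>
    by_cases hc : c = '`'
    · simp [pvInnerA, mySplit, hc]
    · simp only [pvInnerA, if_neg hc] at h ⊢
      rw [mySplit, ih h]
      simp [hc]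

lemma pvInnerA_open_mySplit (l : List Char) (h : (pvInnerA l).2.1 = false) :
    mySplit l = [l] := by
  induction l with
  | nil => simp [mySplit]
  | cons c rest ih =>
    by_cases hc : c = '`'
    · simp [pvInnerA, hc] at h
    · simp only [pvInnerA, if_neg hc] at h
      rw [mySplit, ih h]
      simp [hc]

lemma pvCore (l : List Char) (n : Nat) :
    (pvFA l n).1.flatten = (mySplit l).headI ++ (pvFB (mySplit l).tail n).1.flatten ∧
    (pvFA l n).2 = (pvFB (mySplit l).tail n).2 := by
  fun_induction pvFA l n with
  | case1 n => simp [mySplit, pvFB]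
  | case2 rest n code r hm ih =>
    have h1 : (pvInnerA rest).2.1 = true := by rw [hm]
    have h2 : mySplit ('`' :: rest) = [] :: code :: mySplit r := by
      rw [show mySplit ('`' :: rest) = [] :: mySplit rest from by simp [mySplit],
        pvInnerA_closed_mySplit rest h1, hm]
    rw [h2, mySplit_cons r]
    simp only [List.tail_cons, pvFB, List.flatten_cons]
    rw [mySplit_cons r] at ih
    exact ⟨by simp [ih.1], by simp [ih.2]⟩
  | case3 rest n code cl rr heq hne ih =>
    have hcl : cl = false := by simpa using hne
    subst hcl
    have h1 : (pvInnerA rest).2.1 = false := by rw [heq]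
    have h2 : mySplit rest = [rest] := pvInnerA_open_mySplit rest h1
    have h3 : mySplit ('`' :: rest) = [[], rest] := by
      rw [show mySplit ('`' :: rest) = [] :: mySplit rest from by simp [mySplit], h2]
    rw [h2] at ih
    rw [h3]
    simp only [List.tail_cons, List.headI_cons, pvFB, List.flatten_cons,
      List.flatten_nil, List.append_nil, List.nil_append] at ih ⊢
    exact ⟨by simp [ih.1], by simp [ih.2]⟩
  | case4 c rest n hc ih =>
    have h2 : mySplit (c :: rest) = (c :: (mySplit rest).headI) :: (mySplit rest).tail := by
      rw [mySplit]; simp [hc]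
    rw [h2]
    simp only [List.headI_cons, List.tail_cons, List.flatten_cons]
    exact ⟨by simp [ih.1], ih.2⟩

-- ===== VERDICT (by name: the statement is the Claim_ definition above) =====
theorem protect_code_spans_py_spec : Claim_equal_protect_code_spans_py := by
  intro text _
  unfold Spec_protect_code_spans_py protect_code_spans_py protect_code_spans_py_alt
  have hs : PySem.Chars.splitOn text.toList ['`'] =
      (mySplit text.toList).headI :: (mySplit text.toList).tail := by
    rw [splitOn_eq_mySplit]; exact mySplit_cons _
  rw [hs]
  simp only [pvMainA_acc, pvLoopB_acc, List.length_nil, List.nil_append]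
  have h := pvCore text.toList 0
  simp only [List.flatten_cons, List.flatten_append, List.flatten_nil]
  rw [h.1, h.2]
  simp
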